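/- GENERATED by tools/from_farm_form.py from prooffarm-gif/accepted/DGifGetWord.E/Proof.lean (a worked proof of the farm's unit `DGifGetWord.E`,
   accepted by the verdict) — do not edit. -/
import Gif.Spec.Units.DGifGetWord_E
import Gif.Spec.AllSegs

open X86 X86.User Asan ProgX.Base ProgX.Base.Spec Gif.Spec

set_option maxRecDepth 4000
set_option maxHeartbeats 4000000

/-!
  `DGifGetWord.E` (0x10608c … the `ret` at 0x10609f, 6 instructions; dgif_lib.c:751): THE EPILOGUE OF A PROTECTED FUNCTION, the worked
  example of the fifteen epilogue units. The lemmas are those of Gif/Spec/FrameCarry.lean (§1, §2, §4; its header has this recipe),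
  the traps are in farm.gif/hints/protected_frame.md. The blocks below:
    1. the prelude: the segment's entry assertion as walker facts; the shadow index register as a word VARIABLE `b` with bounds;
    2. the walk to the `ret` (the pops and the return address are read through the shadow store by the walker itself);
    3. `stores1_index`: `hmem : s.mem = storesMem v.mem (base / 8) F.epilogue`;
    4. `after_epilogue` (`HeapInv` for the callers' frames, `GifOK`, `rem`), `epilogue_same` (`Returned.same`), `rd_storesMem`;
    5. `Returned`, field by field.
-/

/-- The epilogue of `DGifGetWord` takes `Done` at 0x10608c to `Returned`. -/
theorem Gif.Spec.Proved.DGifGetWord_E_ok : Gif.Spec.DGifGetWord_E.Statement := by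
  intro Lay hLay μ hμ u₀ hcode H rest frames F R e ret v hat
  -- 1. THE PRELUDE: the entry assertion `Done` = `Body` + the results
  obtain ⟨hbody, hres, hok1, hok0⟩ := hat
  have he := hbody.entry
  v_entry he
  obtain ⟨henv, hrdi, hword⟩ := hbody.pre
  -- what the walker reads of a segment's entry state: rip, rsp (as `c_rsp`), the registers kept, the text, DF / MXCSR
  have w_rip := hbody.rip
  have c_rsp : v.reg .rsp = e.reg .rsp - 88 := hbody.rsp
  have w_kept : RegsKept [.rsp] v v := RegsKept.refl _ _
  have w_eq : Mem.EqOn ProgX.Base.L.textLo ProgX.Base.L.textHi u₀.mem v.mem := ProgX.Base.conv_code_eqOn hbody.code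
  have hdf := (show abiInv _ from hbody.abi).1
  have hmx := (show abiInv _ from hbody.abi).2
  have hsse := ProgX.Base.sseOK_of_abiInv hbody.abi
  -- the slots the pops and the `ret` read
  have k_r12 : v.mem.readLE (e.reg .rsp - 8) 8 = (e.reg .r12).toNat := hbody.slot_r12
  have k_rbp : v.mem.readLE (e.reg .rsp - 16) 8 = (e.reg .rbp).toNat := hbody.slot_rbp
  have k_rbx : v.mem.readLE (e.reg .rsp - 24) 8 = (e.reg .rbx).toNat := hbody.slot_rbx
  have k_ra : UInt64.ofNat (v.mem.readLE (e.reg .rsp) 8) = ret := hbody.slot_ra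
  -- THE SHADOW INDEX REGISTER AS A VARIABLE `b` WITH BOUNDS: no `>>> 3` is in the walk's context
  have e88 : (e.reg .rsp - 88).toNat = (e.reg .rsp).toNat - 88 := by u_omega
  obtain ⟨b, hb⟩ : ∃ b : Word, b = (e.reg .rsp - 88) >>> 3 := ⟨_, rfl⟩
  have hbn : b.toNat = ((e.reg .rsp).toNat - 88) / 8 := by
    rw [hb, Asan.toNat_shr3, e88]
  have hb1 : 0xE0000 ≤ b.toNat := by omega
  have hb2 : b.toNat + 8 ≤ 0x100000 := by omega
  have c_rbx : v.reg .rbx = b := by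
    rw [hb]
    exact hbody.rbx
  clear hb
  -- 2. THE WALK, to the `ret`: no side goal is left
  u_walk hcode [hμ.vendor] span [ProgX.Base.L.textLo, ProgX.Base.L.textHi] side (v_side)
  -- 3. THE EPILOGUE'S STORE AS THE LAYOUT'S `storesMem`: the displacement as the walker prints it, granule offset, width, value
  have hepi : Gif.Frames.DGifGetWord.epilogue = [⟨0, 8, 0⟩] := rfl
  have hmem : s_10609f.mem = storesMem v.mem (((e.reg .rsp).toNat - 88) / 8) Gif.Frames.DGifGetWord.epilogue := by
    rw [hepi, w_mem, ← hbn]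
    exact stores1_index v.mem b 12582912 0 8 0 (by omega) (by decide) (by decide)
  have hin : ∀ s, s ∈ Gif.Frames.DGifGetWord.epilogue → s.idx + s.width ≤ 8 := by decide
  clear w_mem
  -- 4. THE ENVIRONMENT behind the epilogue: the callers' frames, the clean stack ends above the return address
  obtain ⟨hinv2, hok2, hrem2⟩ := after_epilogue (top := (e.reg .rsp).toNat) (ro := 88) (Fl := Gif.Frames.DGifGetWord) rfl
    hbody.inv henv.ctx hbody.ok he_align he_top henv.heap.inv.frames_above
  -- the frame's shadow span leaves the footprint
  have hsame2 := epilogue_same (top := (e.reg .rsp).toNat) (ro := 88) (ro' := 24) (Fl := Gif.Frames.DGifGetWord) rfl rfl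
    henv.heap.inv hbody.inv he_align hbody.same
  rw [← hmem] at hinv2 hok2 hrem2 hsame2
  -- what the post reads: `*Word` (inside gif) over the shadow store; the result register
  have hgin := henv.ok.owns.inside henv.heap.inv.heap (o := (F.gif, 120)) List.mem_cons_self
  have hbase := henv.heap.base
  simp only at hgin
  rw [hbase] at hgin
  have hrd : rd s_10609f.mem (e.reg .rsi).toNat 4 = rd v.mem (e.reg .rsi).toNat 4 := by
    rw [hmem]
    exact rd_storesMem v.mem _ 8 _ hin (by omega) _ _ (by omega)
  have e_rax : s_10609f.reg .rax = v.reg .rax := w_kept.get .rax rfl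
  -- 5. `Returned`, field by field
  refine ReachVia.done ?_
  refine X86.User.Returned.mk w_rip w_rsp ?saved ?same (ProgX.Base.conv_code_in w_eq) ?abi ?post
  case saved =>
    -- the popped registers are the walker's facts; `r13 r14 r15` were never touched: `Body.r13 …`
    intro r hr
    cases r <;> first
      | exact absurd hr (by decide)
      | (with_reducible assumption)
      | exact (w_kept _ rfl).trans hbody.r13
      | exact (w_kept _ rfl).trans hbody.r14
      | exact (w_kept _ rfl).trans hbody.r15
  case same =>
    simp only [X86.User.Spec.footprint, vspec]
    exact hsame2
  case abi =>
    -- DF and MXCSR by hand (`v_inv` is slow behind a walk with shadow stores)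
    refine ProgX.Base.abiInv_of ?_ ?_
    · rw [w_flags]
      simp only [X86.User.df_setStatus]
      exact hdf
    · rw [w_mxcsr]
      exact hmx
  case post =>
    -- `Back` (the environment, the reader did not go back), the result, the two clauses of `Done`
    refine ⟨⟨hinv2, hok2, ?_⟩, ?_, ?_, ?_⟩
    · rw [hrem2]
      exact hbody.rem
    · rw [e_rax]
      exact hres
    · rw [e_rax, hrd, hrem2]
      exact hok1
    · rw [e_rax, hrd]
      exact hok0
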